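-- pv_equiv track=rewrite | github.com/jonddeck/Sorting-Algorithms | Postman Sort/postman_sort.py | count_sort_by_position
-- ===== SOURCE A (Python) =====
-- def count_sort_by_position(arr, position):
--     """
--     Counts sort based on character at given position.
--
--     Args:
--         arr: List of strings
--         position: Character position to sort by
--
--     Returns:
--         Sorted list
--     """
--     # Create buckets for all possible characters
--     buckets = {}
--
--     for string in arr:
--         if position < len(string):
--             char = string[position]
--         else:
--             char = ' '  # Pad with space for shorter strings
--
--         if char not in buckets:
--             buckets[char] = []
--         buckets[char].append(string)
--
--     # Concatenate buckets in sorted order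
--     result = []
--     for char in sorted(buckets.keys()):
--         result.extend(buckets[char])
--
--     return result
-- ===== SOURCE B (Python) =====
-- def count_sort_by_position(arr, position):
--     """Stable comparison sort by the character at `position` (space-padded)."""
--     return sorted(arr, key=lambda s: s[position] if position < len(s) else ' ')
-- ===== Notes on version B (the rewrite author's own statement) =====
-- stated objective: idiomatic
-- what changed: Replaces the hand-rolled dict-of-buckets pass plus sorted-key concatenation with a single call to Python's stable sorted() using the character at the position (space-padded) as key.
import Mathlib
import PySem

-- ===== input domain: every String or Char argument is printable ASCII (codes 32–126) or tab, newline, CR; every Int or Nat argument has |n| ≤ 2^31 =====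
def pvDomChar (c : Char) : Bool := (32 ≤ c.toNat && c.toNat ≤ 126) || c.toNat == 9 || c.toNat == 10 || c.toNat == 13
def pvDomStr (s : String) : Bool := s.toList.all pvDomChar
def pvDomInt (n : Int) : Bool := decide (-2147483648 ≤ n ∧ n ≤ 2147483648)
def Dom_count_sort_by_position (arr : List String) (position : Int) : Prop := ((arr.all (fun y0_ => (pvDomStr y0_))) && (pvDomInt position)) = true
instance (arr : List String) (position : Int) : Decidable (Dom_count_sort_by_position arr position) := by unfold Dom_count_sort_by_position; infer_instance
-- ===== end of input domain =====

-- B replaces A's dict-of-buckets pass plus sorted-key concatenation with a single stable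
-- sorted() call on the same (space-padded) character key; same return value wherever A returns.

-- ===== PORT A =====
def count_sort_by_position (arr : List String) (position : Int) : List String :=
  -- buckets = {}; for string in arr: char = string[position] if position < len(string) else ' ';
  --   if char not in buckets: buckets[char] = []  /  buckets[char].append(string)
  -- (the two-line "ensure key exists, then append" idiom is Dict.modify with default [];
  --  pyGet?'s none case — Python's IndexError — is excluded by Pre_)
  let buckets : PySem.Dict Char (List String) :=
    arr.foldl (fun b s =>
      let char : Char :=
        if position < PySem.Str.len s then (PySem.Str.pyGet? s position).getD ' ' else ' '
      b.modify char [] (fun l => l ++ [s])) PySem.Dict.empty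
  -- result = []; for char in sorted(buckets.keys()): result.extend(buckets[char])
  (PySem.List.sorted buckets.keys (fun c => c)).foldl
    (fun result c => result ++ buckets.getD c []) []

-- ===== PORT B =====
def count_sort_by_position_alt (arr : List String) (position : Int) : List String :=
  -- return sorted(arr, key=lambda s: s[position] if position < len(s) else ' ')
  PySem.List.sorted arr (fun s =>
    if position < PySem.Str.len s then (PySem.Str.pyGet? s position).getD ' ' else ' ')

-- ===== PRECONDITION & SPEC =====
-- Pre_ excludes exactly the inputs where the Python A raises IndexError: a negative
-- position reaching past the start of some string (B's Python raises there too).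
def Pre_count_sort_by_position (arr : List String) (position : Int) : Prop :=
  ∀ s ∈ arr, -(PySem.Str.len s) ≤ position
instance (arr : List String) (position : Int) : Decidable (Pre_count_sort_by_position arr position) := by unfold Pre_count_sort_by_position; infer_instance

def pvWitness_count_sort_by_position : List String × Int := (["ba", "ab", "", "b"], 0)

def Spec_count_sort_by_position (arr : List String) (position : Int) (out : List String) : Prop := out = count_sort_by_position_alt arr position
instance (arr : List String) (position : Int) (out : List String) : Decidable (Spec_count_sort_by_position arr position out) := by unfold Spec_count_sort_by_position; infer_instance

-- ===== CLAIM (what is proved, stated in full; the proofs are below) =====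
def Claim_equal_count_sort_by_position : Prop := ∀ (arr : List String) (position : Int), Dom_count_sort_by_position arr position → Pre_count_sort_by_position arr position → Spec_count_sort_by_position arr position (count_sort_by_position arr position)

-- ===== LEMMAS AND PROOFS =====

theorem insertBy_cons_of_before {α : Type} (before : α → α → Bool) (x y : α) (ys : List α)
    (h : before x y = true) :
    PySem.List.insertBy before x (y :: ys) = x :: y :: ys := by
  simp [PySem.List.insertBy, h]

theorem insertBy_cons_of_not_before {α : Type} (before : α → α → Bool) (x y : α) (ys : List α)
    (h : before x y = false) :
    PySem.List.insertBy before x (y :: ys) = y :: PySem.List.insertBy before x ys := by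
  simp [PySem.List.insertBy, h]

theorem insertBy_of_forall_before {α : Type} (before : α → α → Bool) (x : α) (t : List α)
    (h : ∀ y ∈ t, before x y = true) :
    PySem.List.insertBy before x t = x :: t := by
  cases t with
  | nil => rfl
  | cons y ys => exact insertBy_cons_of_before _ _ _ _ (h y (by simp))

theorem insertBy_append_of_forall_not {α : Type} (before : α → α → Bool) (x : α)
    (l t : List α) (h : ∀ y ∈ l, before x y = false) :
    PySem.List.insertBy before x (l ++ t) = l ++ PySem.List.insertBy before x t := by
  induction l with
  | nil => rfl
  | cons y ys ih =>
    rw [List.cons_append, insertBy_cons_of_not_before _ _ _ _ (h y (by simp)),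
      ih (fun z hz => h z (by simp [hz])), List.cons_append]

theorem flatMap_congr_mem {α β : Type} (l : List α) (f g : α → List β)
    (h : ∀ a ∈ l, f a = g a) : l.flatMap f = l.flatMap g := by
  induction l with
  | nil => rfl
  | cons a t ih =>
    simp only [List.flatMap_cons, h a (by simp), ih (fun z hz => h z (by simp [hz]))]

-- Inserting x into a bucket concatenation (buckets listed by strictly increasing key, each
-- nonempty with constant key) appends x at the end of its bucket, creating it if new.
theorem insertBy_flatMap {α κ : Type} [LinearOrder κ] (key : α → κ) (x : α)
    (K : List κ) (g : κ → List α)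
    (hK : K.Pairwise (· < ·))
    (hg : ∀ c ∈ K, ∀ a ∈ g c, key a = c)
    (hne : ∀ c ∈ K, g c ≠ [])
    (hout : key x ∉ K → g (key x) = []) :
    PySem.List.insertBy (fun a b => decide (key a < key b)) x (K.flatMap g) =
      (if key x ∈ K then K
       else PySem.List.insertBy (fun a b => decide (a < b)) (key x) K).flatMap
        (fun c => g c ++ if key x = c then [x] else []) := by
  induction K with
  | nil =>
    rw [if_neg (List.not_mem_nil)]
    show PySem.List.insertBy _ x [] = _
    rw [show PySem.List.insertBy (fun a b => decide (a < b)) (key x) ([] : List κ) = [key x] from rfl]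
    simp [hout (List.not_mem_nil), PySem.List.insertBy]
  | cons d K ih =>
    have hdK : ∀ e ∈ K, d < e := fun e he => List.rel_of_pairwise_cons hK he
    rcases lt_trichotomy (key x) d with hlt | heq | hgt
    · -- key x < d : x goes to the front with a fresh bucket
      have hnot : key x ∉ d :: K := by
        intro hmem
        rcases List.mem_cons.mp hmem with h | h
        · exact absurd h (ne_of_lt hlt)
        · exact lt_irrefl _ (hlt.trans (hdK _ h))
      obtain ⟨y, ys, hgd⟩ := List.exists_cons_of_ne_nil (hne d (by simp))
      have hky : key y = d := hg d (by simp) y (by simp [hgd])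
      have hcg : List.flatMap (fun c => g c ++ if key x = c then [x] else []) K
          = List.flatMap g K :=
        flatMap_congr_mem _ _ _
          (fun c hc => by rw [if_neg (ne_of_lt (hlt.trans (hdK _ hc))), List.append_nil])
      rw [if_neg hnot, List.flatMap_cons, hgd, List.cons_append,
        insertBy_cons_of_before _ _ _ _ (by simp [hky, hlt]),
        insertBy_cons_of_before (fun a b => decide (a < b)) (key x) d K (by simp [hlt]),
        List.flatMap_cons, List.flatMap_cons, hout hnot, if_pos rfl,
        if_neg (ne_of_lt hlt), hcg, hgd]
      simp
    · -- key x = d : x appended to bucket d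
      have hmem : key x ∈ d :: K := by simp [heq]
      have hcg : List.flatMap (fun c => g c ++ if key x = c then [x] else []) K
          = List.flatMap g K :=
        flatMap_congr_mem _ _ _
          (fun c hc => by rw [if_neg (ne_of_lt (heq ▸ hdK c hc)), List.append_nil])
      rw [if_pos hmem, List.flatMap_cons,
        insertBy_append_of_forall_not _ _ _ _
          (fun y hy => by simp [hg d (by simp) y hy, heq]),
        insertBy_of_forall_before _ _ _
          (fun y hy => by
            obtain ⟨c, hc, hyc⟩ := List.mem_flatMap.mp hy
            simp [hg c (by simp [hc]) y hyc, heq ▸ hdK c hc]),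
        List.flatMap_cons, if_pos heq, hcg]
      simp
    · -- d < key x : skip bucket d and recurse
      have hne' : key x ≠ d := ne_of_gt hgt
      rw [List.flatMap_cons,
        insertBy_append_of_forall_not _ _ _ _
          (fun y hy => by simp [hg d (by simp) y hy, not_lt_of_gt hgt]),
        ih (List.pairwise_cons.mp hK).2
          (fun c hc a ha => hg c (by simp [hc]) a ha)
          (fun c hc => hne c (by simp [hc]))
          (fun h => hout (by simp [hne', h]))]
      by_cases hmem : key x ∈ K
      · rw [if_pos hmem, if_pos (by simp [hmem]), List.flatMap_cons,
          if_neg hne', List.append_nil]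
      · rw [if_neg hmem, if_neg (by simp [hne', hmem]),
          insertBy_cons_of_not_before (fun a b => decide (a < b)) (key x) d K
            (by simp [not_lt_of_gt hgt]),
          List.flatMap_cons, if_neg hne', List.append_nil]

-- A stable key sort is the concatenation, over the keys in increasing order, of the
-- (order-preserving) filters of the input by each key.
theorem sorted_eq_flatMap_buckets {α κ : Type} [LinearOrder κ] [BEq κ] [LawfulBEq κ]
    (key : α → κ) (xs : List α) :
    PySem.List.sorted xs key =
      (PySem.List.sorted (PySem.Set.ofList (xs.map key)) (fun c => c)).flatMap
        (fun c => xs.filter (fun a => key a == c)) := by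
  induction xs using List.reverseRecOn with
  | nil => rfl
  | append_singleton xs x ih =>
    have hstep : ∀ (l : List α),
        PySem.List.sorted (l ++ [x]) key =
          PySem.List.insertBy (fun a b => decide (key a < key b)) x (PySem.List.sorted l key) := by
      intro l
      rw [PySem.List.sorted_eq_foldl_insertBy, PySem.List.sorted_eq_foldl_insertBy,
        List.foldl_append, List.foldl_cons, List.foldl_nil]
    rw [hstep, ih,
      insertBy_flatMap key x _ _
        (PySem.List.sorted_ofList_pairwise_lt _)
        (fun c _ a ha => by simpa using (List.mem_filter.mp ha).2)
        (fun c hc => by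
          have : c ∈ xs.map key := by
            simpa [PySem.List.mem_sorted, PySem.Set.mem_ofList] using hc
          obtain ⟨a, ha, hk⟩ := List.mem_map.mp this
          exact List.ne_nil_of_mem (List.mem_filter.mpr ⟨ha, by simp [hk]⟩))
        (fun h => by
          refine List.filter_eq_nil_iff.mpr (fun a ha => ?_)
          have : key a ≠ key x := by
            intro he
            exact h (by
              simp only [PySem.List.mem_sorted, PySem.Set.mem_ofList]
              exact he ▸ List.mem_map_of_mem ha)
          simpa using fun hee => this (by simp [hee]))]
    have hfun : (fun c => (xs ++ [x]).filter (fun a => key a == c))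
        = (fun c => xs.filter (fun a => key a == c) ++ if key x = c then [x] else []) := by
      funext c
      by_cases h : key x = c <;> simp [List.filter_append, h]
    rw [List.map_append, List.map_cons, List.map_nil, PySem.Set.ofList_append, hfun]
    by_cases hmem : key x ∈ PySem.List.sorted (PySem.Set.ofList (xs.map key)) (fun c => c)
    · have hmem' : key x ∈ PySem.Set.ofList (xs.map key) := by
        simpa [PySem.List.mem_sorted] using hmem
      rw [if_pos hmem]
      rw [show PySem.Set.update (PySem.Set.ofList (xs.map key)) [key x]
            = PySem.Set.ofList (xs.map key) by
          simp [PySem.Set.update_cons, PySem.Set.update_nil, PySem.Set.add_of_mem hmem']]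
    · have hmem' : key x ∉ PySem.Set.ofList (xs.map key) := by
        simpa [PySem.List.mem_sorted] using hmem
      rw [if_neg hmem]
      rw [show PySem.Set.update (PySem.Set.ofList (xs.map key)) [key x]
            = PySem.Set.ofList (xs.map key) ++ [key x] by
          simp [PySem.Set.update_cons, PySem.Set.update_nil, PySem.Set.add_of_not_mem hmem']]
      rw [show PySem.List.sorted (PySem.Set.ofList (xs.map key) ++ [key x]) (fun c => c)
            = PySem.List.insertBy (fun a b => decide (a < b)) (key x)
                (PySem.List.sorted (PySem.Set.ofList (xs.map key)) (fun c => c)) from by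
          rw [PySem.List.sorted_eq_foldl_insertBy, PySem.List.sorted_eq_foldl_insertBy,
            List.foldl_append, List.foldl_cons, List.foldl_nil]]

-- A's grouping loop computes the filter of the input by each key.
theorem getD_group {κ α : Type} [BEq κ] [LawfulBEq κ] (key : α → κ) (l : List α)
    (d : PySem.Dict κ (List α)) (c : κ) :
    (l.foldl (fun b s => b.modify (key s) [] (fun t => t ++ [s])) d).getD c [] =
      d.getD c [] ++ l.filter (fun s => key s == c) := by
  rw [show l.foldl (fun b s => b.modify (key s) [] (fun t => t ++ [s])) d
        = (l.map (fun s => (key s, s))).foldl (fun b p => b.modify p.1 [] (fun t => t ++ [p.2])) d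
      from by rw [List.foldl_map],
    PySem.Dict.getD_foldl_modify_append]
  congr 1
  rw [List.filter_map]
  simp [Function.comp_def]

-- A's result in bucket-concatenation form.
theorem count_sort_eq_flatMap (arr : List String) (position : Int) :
    count_sort_by_position arr position =
      (PySem.List.sorted
          (PySem.Set.ofList (arr.map (fun s =>
            if position < PySem.Str.len s then (PySem.Str.pyGet? s position).getD ' ' else ' ')))
          (fun c => c)).flatMap
        (fun c => arr.filter (fun s =>
          (if position < PySem.Str.len s then (PySem.Str.pyGet? s position).getD ' ' else ' ') == c)) := by
  simp only [count_sort_by_position]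
  rw [PySem.List.foldl_append_eq_flatMap, List.nil_append,
    PySem.Dict.keys_foldl_modify_key arr
      (fun s => if position < PySem.Str.len s then (PySem.Str.pyGet? s position).getD ' ' else ' ')
      [] (fun _ s => fun t => t ++ [s]),
    PySem.Dict.keys_empty, PySem.Set.update_nil_left]
  exact flatMap_congr_mem _ _ _ (fun c _ => by
    rw [getD_group, PySem.Dict.getD_empty, List.nil_append])

-- ===== VERDICT (by name: the statement is the Claim_ definition above) =====
theorem count_sort_by_position_spec : Claim_equal_count_sort_by_position := by
  intro arr position _ _
  show count_sort_by_position arr position = count_sort_by_position_alt arr position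
  rw [count_sort_eq_flatMap, count_sort_by_position_alt]
  exact (sorted_eq_flatMap_buckets _ arr).symm
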